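-- pv_equiv track=rewrite | github.com/zjandali/prototype | utils.py | aggregateUpper
-- ===== SOURCE A (Python) =====
-- def aggregateUpper(hashtag_list):
--     hashtag_list_copy = hashtag_list
--     length = [len(i) for i in hashtag_list_copy]
--     if length[0]==0:
--         hashtag_list_copy.pop(0)
--         length.pop(0)
--     change = True
--     try:
--         while change:
--             pos = length.index(1)
--             if length[pos+1]==1:
--                 hashtag_list_copy[pos] = hashtag_list_copy[pos]+hashtag_list_copy[pos+1]
--                 hashtag_list_copy.pop(pos+1)
--                 length.pop(pos+1)
--                 change = True
--             else:
--                 change = False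
--     except:
--         pass
--     return hashtag_list_copy
-- ===== SOURCE B (Python) =====
-- def _merge_run(run, xs):
--     # Consume the leading length-1 strings of xs into run (one pass).
--     k = 0
--     while k < len(xs) and len(xs[k]) == 1:
--         run += xs[k]
--         k += 1
--     return [run] + xs[k:]
--
-- def aggregateUpper(hashtag_list):
--     if hashtag_list and len(hashtag_list[0]) == 0:
--         hashtag_list.pop(0)
--     out = []
--     k = 0
--     while k < len(hashtag_list) and len(hashtag_list[k]) != 1:
--         out.append(hashtag_list[k])
--         k += 1
--     if k < len(hashtag_list):
--         out += _merge_run(hashtag_list[k], hashtag_list[k + 1:])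
--     hashtag_list[:] = out
--     return hashtag_list
-- ===== Notes on version B (the rewrite author's own statement) =====
-- stated objective: alternative
-- what changed: A repeatedly re-scans a shadow length list with length.index(1) and pops one element per merge (the merged entry's stored length goes stale at 1, which is what keeps it extending the first run); B drops the shadow list and makes a single left-to-right pass that copies the prefix of non-length-1 strings and joins the first consecutive run of length-1 strings once.
import Mathlib
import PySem

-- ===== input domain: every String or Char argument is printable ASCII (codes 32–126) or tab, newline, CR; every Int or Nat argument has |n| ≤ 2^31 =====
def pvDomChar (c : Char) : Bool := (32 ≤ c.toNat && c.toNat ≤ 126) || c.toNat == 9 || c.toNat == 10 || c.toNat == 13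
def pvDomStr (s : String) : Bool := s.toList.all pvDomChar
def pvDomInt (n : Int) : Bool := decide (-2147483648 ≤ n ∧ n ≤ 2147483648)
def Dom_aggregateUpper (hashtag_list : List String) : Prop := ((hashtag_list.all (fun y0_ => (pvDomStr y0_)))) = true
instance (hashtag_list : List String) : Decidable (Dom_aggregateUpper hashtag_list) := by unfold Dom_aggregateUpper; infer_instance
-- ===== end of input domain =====

-- B replaces A's repeated length.index(1)/pop merge loop (driven by a shadow length list with a
-- stale entry) by one left-to-right pass that joins the first consecutive run of length-1 strings;
-- both A and B mutate the argument list in place the same way; the equivalence proved is about the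
-- return value.

-- ===== PORT A =====
-- A's `while change` loop on (hashtag_list_copy, length); the stale `length` entries are kept exactly
-- as Python keeps them (length[pos] is never updated after a merge).
def aggregateUpperLoop (copy : List String) (length : List Int) : List String :=
  match PySem.List.index? length 1 with
  | none => copy                                   -- ValueError from length.index(1), caught by `except`
  | some pos =>
    match PySem.List.pyGet? length ((pos : Int) + 1) with
    | none => copy                                 -- IndexError on length[pos+1], caught by `except`
    | some l =>
      if l = 1 then
        match PySem.List.pyGet? copy (pos : Int), PySem.List.pyGet? copy ((pos : Int) + 1) with
        | some a, some b =>
          match PySem.List.pop? (copy.set pos (a ++ b)) ((pos : Int) + 1),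
                hpop2 : PySem.List.pop? length ((pos : Int) + 1) with
          | some c2, some l2 => aggregateUpperLoop c2.2 l2.2
          | some c2, none => c2.2                  -- IndexError mid-mutation, caught: current state returned
          | none, _ => copy.set pos (a ++ b)       -- IndexError mid-mutation, caught: current state returned
        | _, _ => copy                             -- IndexError before mutation, caught
      else copy
termination_by length.length
decreasing_by
  have := PySem.List.length_of_pop?_eq_some _ hpop2; omega

def aggregateUpper (hashtag_list : List String) : List String :=
  match hashtag_list with
  | [] => []            -- length[0] raises IndexError (outside the try); excluded by Pre_
  | h :: t =>
      if PySem.Str.len h = 0 then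
        aggregateUpperLoop t (t.map PySem.Str.len)          -- both pop(0) executed
      else
        aggregateUpperLoop (h :: t) ((h :: t).map PySem.Str.len)

-- ===== PORT B =====
-- _merge_run: consume the leading length-1 strings of xs into run
def mergeRunB (run : String) (xs : List String) : List String :=
  match xs with
  | [] => [run]
  | t :: rest => if PySem.Str.len t = 1 then mergeRunB (run ++ t) rest else run :: t :: rest

-- B's main `while` scan: copy the prefix of non-length-1 strings, then hand over to _merge_run
def scanB (xs : List String) : List String :=
  match xs with
  | [] => []
  | s :: rest => if PySem.Str.len s ≠ 1 then s :: scanB rest else mergeRunB s rest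

def aggregateUpper_alt (hashtag_list : List String) : List String :=
  match hashtag_list with
  | [] => []
  | h :: t => if PySem.Str.len h = 0 then scanB t else scanB (h :: t)

-- ===== PRECONDITION & SPEC =====
-- Pre_ excludes only the empty list, on which A's `length[0]` raises IndexError (outside the try).
def Pre_aggregateUpper (hashtag_list : List String) : Prop := hashtag_list ≠ []
instance (hashtag_list : List String) : Decidable (Pre_aggregateUpper hashtag_list) := by unfold Pre_aggregateUpper; infer_instance
def pvWitness_aggregateUpper : List String := ["a"]

def Spec_aggregateUpper (hashtag_list : List String) (out : List String) : Prop := out = aggregateUpper_alt hashtag_list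
instance (hashtag_list : List String) (out : List String) : Decidable (Spec_aggregateUpper hashtag_list out) := by unfold Spec_aggregateUpper; infer_instance

-- ===== CLAIM (what is proved, stated in full; the proofs are below) =====
def Claim_equal_aggregateUpper : Prop := ∀ (hashtag_list : List String), Dom_aggregateUpper hashtag_list → Pre_aggregateUpper hashtag_list → Spec_aggregateUpper hashtag_list (aggregateUpper hashtag_list)

-- ===== LEMMAS AND PROOFS =====

theorem pv_eraseIdx_append {α : Type} (l1 l2 : List α) (n : Nat) :
    (l1 ++ l2).eraseIdx (l1.length + n) = l1 ++ l2.eraseIdx n := by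
  induction l1 with
  | nil => simp
  | cons h t ih => simp [Nat.succ_add, ih]

theorem aggLoop_id (xs : List String) (lens : List Int) (h : (1 : Int) ∉ lens) :
    aggregateUpperLoop xs lens = xs := by
  have hidx : PySem.List.index? lens 1 = none := (PySem.List.index?_eq_none_iff lens 1).mpr h
  rw [aggregateUpperLoop, hidx]

theorem pv_one_not_mem_map (p : List String) (hp : ∀ x ∈ p, PySem.Str.len x ≠ 1) :
    (1 : Int) ∉ p.map PySem.Str.len := by
  intro hmem
  obtain ⟨x, hx, hc⟩ := List.mem_map.mp hmem
  exact hp x hx hc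

theorem aggLoop_eq (r p : List String) (s : String)
    (hp : ∀ x ∈ p, PySem.Str.len x ≠ 1) :
    aggregateUpperLoop (p ++ s :: r) (p.map PySem.Str.len ++ 1 :: r.map PySem.Str.len)
      = p ++ mergeRunB s r := by
  induction r generalizing s with
  | nil =>
    have hidx : PySem.List.index? (p.map PySem.Str.len ++ 1 :: ([] : List String).map PySem.Str.len) 1
        = some p.length := by
      refine (PySem.List.index?_eq_some_iff _ _ _).mpr
        ⟨p.map PySem.Str.len, [], by simp, by simp, pv_one_not_mem_map p hp⟩
    have hget : PySem.List.pyGet? (p.map PySem.Str.len ++ 1 :: ([] : List String).map PySem.Str.len)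
        ((p.length : Int) + 1) = none := by
      have h1 := PySem.List.pyGet?_append_right (p.map PySem.Str.len) [(1 : Int)] 1
      simpa using h1
    rw [aggregateUpperLoop]
    simp only [hidx, hget]
    simp [mergeRunB]
  | cons t r' ih =>
    have hidx : PySem.List.index? (p.map PySem.Str.len ++ 1 :: (t :: r').map PySem.Str.len) 1
        = some p.length := by
      refine (PySem.List.index?_eq_some_iff _ _ _).mpr
        ⟨p.map PySem.Str.len, _, rfl, by simp, pv_one_not_mem_map p hp⟩
    have hget : PySem.List.pyGet? (p.map PySem.Str.len ++ 1 :: (t :: r').map PySem.Str.len)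
        ((p.length : Int) + 1) = some (PySem.Str.len t) := by
      have h1 := PySem.List.pyGet?_append_right (p.map PySem.Str.len)
        (1 :: (t :: r').map PySem.Str.len) 1
      simpa using h1
    rw [aggregateUpperLoop]
    by_cases h1 : PySem.Str.len t = 1
    · have hga : PySem.List.pyGet? (p ++ s :: t :: r') (p.length : Int) = some s :=
        PySem.List.pyGet?_append_length p (t :: r') s
      have hgb : PySem.List.pyGet? (p ++ s :: t :: r') ((p.length : Int) + 1) = some t := by
        have h2 := PySem.List.pyGet?_append_right p (s :: t :: r') 1
        simpa using h2
      have hset : (p ++ s :: t :: r').set p.length (s ++ t) = p ++ (s ++ t) :: t :: r' := by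
        simp
      have hpopc : PySem.List.pop? (p ++ (s ++ t) :: t :: r') ((p.length : Int) + 1)
          = some (t, p ++ (s ++ t) :: r') := by
        have hlt : p.length + 1 < (p ++ (s ++ t) :: t :: r').length := by simp
        have h3 := PySem.List.pop?_natCast (p ++ (s ++ t) :: t :: r') (p.length + 1) hlt
        have hg : (p ++ (s ++ t) :: t :: r')[p.length + 1]'hlt = t := by
          rw [List.getElem_append_right (by omega)]
          simp
        have he : (p ++ (s ++ t) :: t :: r').eraseIdx (p.length + 1) = p ++ (s ++ t) :: r' := by
          have h4 := pv_eraseIdx_append p ((s ++ t) :: t :: r') 1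
          simpa [List.eraseIdx] using h4
        rw [show ((p.length : Int) + 1) = ((p.length + 1 : Nat) : Int) by push_cast; ring]
        rw [h3, hg, he]
      have hpopl : PySem.List.pop? (p.map PySem.Str.len ++ 1 :: (t :: r').map PySem.Str.len)
          ((p.length : Int) + 1)
          = some (PySem.Str.len t, p.map PySem.Str.len ++ 1 :: r'.map PySem.Str.len) := by
        have hlt : p.length + 1 < (p.map PySem.Str.len ++ 1 :: (t :: r').map PySem.Str.len).length := by
          simp
        have h3 := PySem.List.pop?_natCast (p.map PySem.Str.len ++ 1 :: (t :: r').map PySem.Str.len)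
          (p.length + 1) hlt
        have hg : (p.map PySem.Str.len ++ 1 :: (t :: r').map PySem.Str.len)[p.length + 1]'hlt
            = PySem.Str.len t := by
          rw [List.getElem_append_right (by simp)]
          simp
        have he : (p.map PySem.Str.len ++ 1 :: (t :: r').map PySem.Str.len).eraseIdx (p.length + 1)
            = p.map PySem.Str.len ++ 1 :: r'.map PySem.Str.len := by
          have h4 := pv_eraseIdx_append (p.map PySem.Str.len) (1 :: (t :: r').map PySem.Str.len) 1
          simpa [List.eraseIdx] using h4
        rw [show ((p.length : Int) + 1) = ((p.length + 1 : Nat) : Int) by push_cast; ring]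
        rw [h3, hg, he]
      simp only [hidx, hget, if_pos h1, hga, hgb, hset, hpopc]
      split
      · rename_i x c2 l2 hc hl
        rw [hpopl] at hl
        injection hc with hc2
        injection hl with hl2
        rw [← hc2, ← hl2]
        dsimp only
        rw [ih (s ++ t)]
        conv_rhs => rw [mergeRunB]
        rw [if_pos h1]
      · rename_i x c2 hc hl
        rw [hpopl] at hl
        simp at hl
      · rename_i x hc
        simp at hc
    · simp only [hidx, hget, if_neg h1]
      conv_rhs => rw [mergeRunB]
      rw [if_neg h1]

theorem scanB_id (xs : List String) (h : ∀ x ∈ xs, PySem.Str.len x ≠ 1) : scanB xs = xs := by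
  induction xs with
  | nil => rfl
  | cons a l ih =>
    rw [scanB]
    simp only [if_pos (h a (by simp))]
    rw [ih (fun x hx => h x (by simp [hx]))]

theorem scanB_append (p : List String) (s : String) (r : List String)
    (hp : ∀ x ∈ p, PySem.Str.len x ≠ 1) (hs : PySem.Str.len s = 1) :
    scanB (p ++ s :: r) = p ++ mergeRunB s r := by
  induction p with
  | nil =>
    rw [List.nil_append, scanB, if_neg (not_not.mpr hs), List.nil_append]
  | cons a l ih =>
    rw [List.cons_append, scanB]
    simp only [if_pos (hp a (by simp))]
    rw [ih (fun x hx => hp x (by simp [hx]))]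
    simp

-- common characterisation: on a fresh list with its true lengths, A's loop computes B's scan
theorem aggLoop_eq_scanB (u : List String) :
    aggregateUpperLoop u (u.map PySem.Str.len) = scanB u := by
  set P : String → Bool := fun x => !(decide (PySem.Str.len x = 1)) with hP
  cases h : u.dropWhile P with
  | nil =>
    have hu : u = u.takeWhile P := by
      conv_lhs => rw [← List.takeWhile_append_dropWhile (p := P) (l := u)]
      rw [h]; simp
    have hall : ∀ x ∈ u, PySem.Str.len x ≠ 1 := by
      intro x hx
      rw [hu] at hx
      have := List.mem_takeWhile_imp hx
      simpa [hP] using this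
    rw [scanB_id u hall]
    exact aggLoop_id u _ (pv_one_not_mem_map u hall)
  | cons s r =>
    have hu : u = u.takeWhile P ++ s :: r := by
      conv_lhs => rw [← List.takeWhile_append_dropWhile (p := P) (l := u)]
      rw [h]
    have hp : ∀ x ∈ u.takeWhile P, PySem.Str.len x ≠ 1 := by
      intro x hx
      have := List.mem_takeWhile_imp hx
      simpa [hP] using this
    have hne : u.dropWhile P ≠ [] := by rw [h]; simp
    have hhead : (u.dropWhile P).head hne = s := by simp [h]
    have hs : PySem.Str.len s = 1 := by
      have hh := List.head_dropWhile_not P hne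
      rw [hhead] at hh
      simpa [hP] using hh
    have hmap : (u.takeWhile P ++ s :: r).map PySem.Str.len
        = (u.takeWhile P).map PySem.Str.len ++ 1 :: r.map PySem.Str.len := by
      simp only [List.map_append, List.map_cons, hs]
    rw [hu, hmap, aggLoop_eq r (u.takeWhile P) s hp, scanB_append _ _ _ hp hs]

-- ===== VERDICT (by name: the statement is the Claim_ definition above) =====
theorem aggregateUpper_spec : Claim_equal_aggregateUpper := by
  intro l _ hpre
  unfold Spec_aggregateUpper
  match l with
  | [] => exact absurd rfl hpre
  | h :: t =>
    rw [aggregateUpper, aggregateUpper_alt]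
    by_cases h0 : PySem.Str.len h = 0
    · simp only [if_pos h0]; exact aggLoop_eq_scanB t
    · simp only [if_neg h0]; exact aggLoop_eq_scanB (h :: t)
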